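-- pv_equiv track=rewrite | github.com/AmiyaBag/PVZsearchbot | bot.py | rotate_number
-- ===== SOURCE A (Python) =====
-- ROTATE_DIGITS = {
--     '0': '0',
--     '1': '1',
--     '6': '9',
--     '8': '8',
--     '9': '6'
-- }
--
-- def rotate_number(number):
--     s = str(number)
--     for ch in s:
--         if ch not in ROTATE_DIGITS:
--             return None
--     rotated_digits = [ROTATE_DIGITS[ch] for ch in reversed(s)]
--     rotated_str = ''.join(rotated_digits).lstrip('0')
--     if rotated_str == '':
--         return None
--     return int(rotated_str)
-- ===== SOURCE B (Python) =====
-- ROT_VALUES = {'0': 0, '1': 1, '6': 9, '8': 8, '9': 6}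
--
-- def rotate_number(number):
--     result = 0
--     for ch in reversed(str(number)):
--         d = ROT_VALUES.get(ch)
--         if d is None:
--             return None
--         result = result * 10 + d
--     return result if result else None
-- ===== Notes on version B (the rewrite author's own statement) =====
-- stated objective: simpler
-- what changed: Replaced the three-pass string pipeline (validate every char, build a rotated string, lstrip zeros, re-parse with int) by a single reversed pass that folds the rotated digit values into an integer accumulator, returning None for an invalid char or a zero result.
import Mathlib
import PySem

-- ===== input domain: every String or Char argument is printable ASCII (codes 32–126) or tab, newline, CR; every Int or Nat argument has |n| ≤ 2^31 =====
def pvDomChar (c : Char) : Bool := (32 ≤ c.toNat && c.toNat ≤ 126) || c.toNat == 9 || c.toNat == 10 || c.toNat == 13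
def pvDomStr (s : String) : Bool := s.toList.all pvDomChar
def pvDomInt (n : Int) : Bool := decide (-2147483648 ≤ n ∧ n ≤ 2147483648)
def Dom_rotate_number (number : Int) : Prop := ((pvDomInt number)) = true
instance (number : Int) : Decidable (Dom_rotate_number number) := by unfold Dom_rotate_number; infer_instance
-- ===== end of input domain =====

-- B replaces A's validate / build-rotated-string / lstrip zeros / int() pipeline by one
-- reversed pass with an integer accumulator (objective: simpler); same return value on every Int.

-- ===== PORT A =====
-- module constant ROTATE_DIGITS (dict of single-char strings; iterated chars are Chars by convention)
def ROTATE_DIGITS : PySem.Dict Char Char :=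
  PySem.Dict.ofList [('0', '0'), ('1', '1'), ('6', '9'), ('8', '8'), ('9', '6')]

-- int(rotated_str) ported by hand as the base-10 digit fold; exact on the nonempty
-- '0'..'9'-only strings this call site receives (guarded by the membership loop before it)
def pvStrToInt (cs : List Char) : Int :=
  cs.foldl (fun a c => a * 10 + ((c.toNat : Int) - 48)) 0

def rotate_number (number : Int) : Option Int :=
  -- s = str(number), kept as its char list (PySem.Int.toChars = (toStr number).toList)
  let s := PySem.Int.toChars number
  -- 'for ch in s: if ch not in ROTATE_DIGITS: return None'
  if s.all (fun ch => PySem.Dict.contains ROTATE_DIGITS ch) then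
    -- [ROTATE_DIGITS[ch] for ch in reversed(s)]; the key is present here, so the
    -- .getD default is dead code (Python would raise KeyError were it absent)
    let rotated_digits := s.reverse.map (fun ch => (PySem.Dict.get? ROTATE_DIGITS ch).getD ch)
    -- ''.join(...) of single-char strings is the char list itself; .lstrip('0') is
    -- exactly dropWhile (· == '0')
    let rotated_str := rotated_digits.dropWhile (fun c => c == '0')
    if rotated_str.isEmpty then none
    else some (pvStrToInt rotated_str)
  else none

-- ===== PORT B =====
-- Source B's module constant ROT_VALUES (char -> rotated digit value)
def ROT_VALUES : PySem.Dict Char Int :=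
  PySem.Dict.ofList [('0', 0), ('1', 1), ('6', 9), ('8', 8), ('9', 6)]

-- the 'for ch in reversed(str(number))' loop: early None on a missing key,
-- else result = result*10 + d
def pvRotLoop : List Char → Int → Option Int
  | [], result => some result
  | ch :: rest, result =>
    match PySem.Dict.get? ROT_VALUES ch with
    | none => none
    | some d => pvRotLoop rest (result * 10 + d)

def rotate_number_alt (number : Int) : Option Int :=
  match pvRotLoop (PySem.Int.toChars number).reverse 0 with
  | none => none
  | some result => if result == 0 then none else some result  -- return result if result else None

-- ===== PRECONDITION & SPEC =====
def Spec_rotate_number (number : Int) (out : Option Int) : Prop := out = rotate_number_alt number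
instance (number : Int) (out : Option Int) : Decidable (Spec_rotate_number number out) := by unfold Spec_rotate_number; infer_instance

-- ===== CLAIM (what is proved, stated in full; the proofs are below) =====
def Claim_equal_rotate_number : Prop := ∀ (number : Int), Dom_rotate_number number → Spec_rotate_number number (rotate_number number)

-- ===== LEMMAS AND PROOFS =====

-- abbreviations used only by the proofs
def pvDv (c : Char) : Int := (c.toNat : Int) - 48
def pvRv (c : Char) : Int := (PySem.Dict.get? ROT_VALUES c).getD 0
def pvRotC (c : Char) : Char := (PySem.Dict.get? ROTATE_DIGITS c).getD c

theorem pvFoldlCongr {α : Type} (f g : Int → α → Int) (l : List α)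
    (h : ∀ c ∈ l, ∀ a, f a c = g a c) : ∀ acc, l.foldl f acc = l.foldl g acc := by
  induction l with
  | nil => intro acc; rfl
  | cons x t ih =>
    intro acc
    rw [List.foldl_cons, List.foldl_cons, h x (List.mem_cons_self ..) acc]
    exact ih (fun c hc a => h c (List.mem_cons_of_mem _ hc) a) _

theorem pvStrToInt_eq (cs : List Char) :
    pvStrToInt cs = cs.foldl (fun a c => a * 10 + pvDv c) 0 := rfl

theorem rdmk : ROTATE_DIGITS = PySem.Dict.mk [('0', '0'), ('1', '1'), ('6', '9'), ('8', '8'), ('9', '6')] := by rfl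
theorem rvmk : ROT_VALUES = PySem.Dict.mk [('0', 0), ('1', 1), ('6', 9), ('8', 8), ('9', 6)] := by rfl

-- the five valid characters
theorem valid_cases (c : Char) (h : PySem.Dict.contains ROTATE_DIGITS c = true) :
    c = '0' ∨ c = '1' ∨ c = '6' ∨ c = '8' ∨ c = '9' := by
  simp [rdmk] at h
  rcases h with h|h|h|h|h <;> subst h <;> simp

-- A's membership test and B's .get-is-some test agree
theorem contains_iff_get?_isSome (c : Char) :
    PySem.Dict.contains ROTATE_DIGITS c = (PySem.Dict.get? ROT_VALUES c).isSome := by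
  simp [rdmk, rvmk, PySem.Dict.get?_mk_cons]
  split_ifs <;> simp_all [beq_iff_eq, PySem.Dict.get?] <;> tauto

-- per-character facts on the five valid characters
theorem dv_rotC_eq_rv (c : Char) (h : PySem.Dict.contains ROTATE_DIGITS c = true) :
    pvDv (pvRotC c) = pvRv c := by
  rcases valid_cases c h with h'|h'|h'|h'|h' <;> subst h' <;> decide

theorem rotC_mem (c : Char) (h : PySem.Dict.contains ROTATE_DIGITS c = true) :
    pvRotC c = '0' ∨ pvRotC c = '1' ∨ pvRotC c = '6' ∨ pvRotC c = '8' ∨ pvRotC c = '9' := by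
  rcases valid_cases c h with h'|h'|h'|h'|h' <;> subst h' <;> decide

-- digit-value range and the zero characterization on the five characters
theorem dv_range (c : Char) (h : c = '0' ∨ c = '1' ∨ c = '6' ∨ c = '8' ∨ c = '9') :
    0 ≤ pvDv c ∧ pvDv c ≤ 9 ∧ (pvDv c = 0 ↔ c = '0') := by
  rcases h with h|h|h|h|h <;> subst h <;> decide

-- B's loop returns none iff some char is missing from the dict
theorem pvRotLoop_invalid (l : List Char) (acc : Int)
    (h : ∃ c ∈ l, PySem.Dict.get? ROT_VALUES c = none) :
    pvRotLoop l acc = none := by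
  induction l generalizing acc with
  | nil => simp at h
  | cons a t ih =>
    rcases h with ⟨c, hc, hnone⟩
    rcases List.mem_cons.mp hc with rfl | hmem
    · simp [pvRotLoop, hnone]
    · cases hget : PySem.Dict.get? ROT_VALUES a with
      | none => simp [pvRotLoop, hget]
      | some d => simpa [pvRotLoop, hget] using ih _ ⟨c, hmem, hnone⟩

-- B's loop on all-valid input is the digit-value fold
theorem pvRotLoop_valid (l : List Char) (acc : Int)
    (h : ∀ c ∈ l, (PySem.Dict.get? ROT_VALUES c).isSome = true) :
    pvRotLoop l acc = some (l.foldl (fun a c => a * 10 + pvRv c) acc) := by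
  induction l generalizing acc with
  | nil => simp [pvRotLoop]
  | cons a t ih =>
    have ha := h a (List.mem_cons_self ..)
    cases hget : PySem.Dict.get? ROT_VALUES a with
    | none => rw [hget] at ha; simp at ha
    | some d =>
      simp only [pvRotLoop, hget, List.foldl_cons]
      rw [ih _ (fun c hc => h c (List.mem_cons_of_mem _ hc))]
      simp [pvRv, hget]

-- leading zeros do not change the digit fold started at 0
theorem strip_val (l : List Char) :
    (l.dropWhile (fun c => c == '0')).foldl (fun a c => a * 10 + pvDv c) 0 =
      l.foldl (fun a c => a * 10 + pvDv c) 0 := by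
  induction l with
  | nil => rfl
  | cons a t ih =>
    by_cases h : a = '0'
    · subst h
      simpa [pvDv] using ih
    · simp [h]

-- the digit fold is nonnegative and zero iff every digit is zero
theorem val_zero (l : List Char) :
    ∀ acc : Int, 0 ≤ acc → (∀ c ∈ l, 0 ≤ pvDv c ∧ pvDv c ≤ 9) →
      (0 ≤ l.foldl (fun a c => a * 10 + pvDv c) acc ∧
       (l.foldl (fun a c => a * 10 + pvDv c) acc = 0 ↔ acc = 0 ∧ ∀ c ∈ l, pvDv c = 0)) := by
  induction l with
  | nil => intro acc hacc _; simpa using hacc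
  | cons a t ih =>
    intro acc hacc hd
    have ha := hd a (List.mem_cons_self ..)
    have hacc' : 0 ≤ acc * 10 + pvDv a := by nlinarith [ha.1]
    have ht := ih (acc * 10 + pvDv a) hacc' (fun c hc => hd c (List.mem_cons_of_mem _ hc))
    constructor
    · simpa using ht.1
    · simp only [List.foldl_cons]
      rw [ht.2]
      constructor
      · rintro ⟨h0, hall⟩
        have : acc = 0 ∧ pvDv a = 0 := by constructor <;> nlinarith [ha.1, ha.2]
        exact ⟨this.1, by simpa [this.2] using hall⟩
      · rintro ⟨h0, hall⟩
        have ha0 := hall a (List.mem_cons_self ..)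
        exact ⟨by simp [h0, ha0], fun c hc => hall c (List.mem_cons_of_mem _ hc)⟩

-- the core equivalence, for an arbitrary char list in place of str(number)
theorem core (cs : List Char) :
    (if cs.all (fun ch => PySem.Dict.contains ROTATE_DIGITS ch) then
       (if ((cs.reverse.map pvRotC).dropWhile (fun c => c == '0')).isEmpty then none
        else some (pvStrToInt ((cs.reverse.map pvRotC).dropWhile (fun c => c == '0'))))
     else none)
    = match pvRotLoop cs.reverse 0 with
      | none => none
      | some result => if result == 0 then none else some result := by
  by_cases hall : cs.all (fun ch => PySem.Dict.contains ROTATE_DIGITS ch) = true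
  · -- every char valid
    have hvalid : ∀ c ∈ cs.reverse, (PySem.Dict.get? ROT_VALUES c).isSome = true := by
      intro c hc
      rw [← contains_iff_get?_isSome]
      exact List.all_eq_true.mp hall c (List.mem_reverse.mp hc)
    have hcont : ∀ c ∈ cs.reverse, PySem.Dict.contains ROTATE_DIGITS c = true := by
      intro c hc; exact List.all_eq_true.mp hall c (List.mem_reverse.mp hc)
    rw [pvRotLoop_valid _ _ hvalid]
    -- the accumulator value equals the digit fold of the rotated string
    set R := cs.reverse.foldl (fun a c => a * 10 + pvRv c) 0 with hR
    have hfold : pvStrToInt (cs.reverse.map pvRotC) = R := by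
      rw [pvStrToInt_eq, List.foldl_map]
      exact pvFoldlCongr _ _ _ (fun c hc a => by rw [dv_rotC_eq_rv c (hcont c hc)]) 0
    have hmem : ∀ c ∈ cs.reverse.map pvRotC, c = '0' ∨ c = '1' ∨ c = '6' ∨ c = '8' ∨ c = '9' := by
      intro c hc
      rcases List.mem_map.mp hc with ⟨d, hd, rfl⟩
      exact rotC_mem d (hcont d hd)
    have hrange : ∀ c ∈ cs.reverse.map pvRotC, 0 ≤ pvDv c ∧ pvDv c ≤ 9 :=
      fun c hc => ⟨(dv_range c (hmem c hc)).1, (dv_range c (hmem c hc)).2.1⟩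
    have hz := (val_zero (cs.reverse.map pvRotC) 0 (le_refl 0) hrange).2
    have hzero : R = 0 ↔ ∀ c ∈ cs.reverse.map pvRotC, c = '0' := by
      rw [← hfold, pvStrToInt_eq, hz]
      constructor
      · rintro ⟨_, hall0⟩ c hc
        exact ((dv_range c (hmem c hc)).2.2).mp (hall0 c hc)
      · intro h0
        exact ⟨rfl, fun c hc => ((dv_range c (hmem c hc)).2.2).mpr (h0 c hc)⟩
    simp only [hall, if_true]
    by_cases hemp : ((cs.reverse.map pvRotC).dropWhile (fun c => c == '0')).isEmpty = true
    · -- stripped to empty = all rotated chars are '0' = accumulator is 0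
      have : ∀ c ∈ cs.reverse.map pvRotC, c = '0' := by
        intro c hc
        have := List.dropWhile_eq_nil_iff.mp (List.isEmpty_iff.mp hemp)
        simpa using this c hc
      have hR0 : R = 0 := hzero.mpr this
      have hb : (R == 0) = true := by simpa [beq_iff_eq] using hR0
      simp only [hemp, hb, if_true]
    · have hne : ¬ (∀ c ∈ cs.reverse.map pvRotC, c = '0') := by
        intro hc
        exact hemp (List.isEmpty_iff.mpr (List.dropWhile_eq_nil_iff.mpr (by simpa using hc)))
      have hR0 : ¬ R = 0 := fun h => hne (hzero.mp h)
      have hst : pvStrToInt ((cs.reverse.map pvRotC).dropWhile (fun c => c == '0')) = R := by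
        rw [pvStrToInt_eq, strip_val, ← pvStrToInt_eq]
        exact hfold
      have hb : (R == 0) = false := by simpa [beq_iff_eq] using hR0
      have hemp' : ((cs.reverse.map pvRotC).dropWhile (fun c => c == '0')).isEmpty = false :=
        Bool.not_eq_true _ |>.mp hemp
      simp only [hemp', hb, Bool.false_eq_true, if_false, hst]
  · -- some invalid char: both sides none
    have : ∃ c ∈ cs.reverse, PySem.Dict.get? ROT_VALUES c = none := by
      rcases List.all_eq_false.mp (Bool.not_eq_true _ |>.mp hall) with ⟨c, hc, hfc⟩
      refine ⟨c, List.mem_reverse.mpr hc, ?_⟩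
      have hcf : PySem.Dict.contains ROTATE_DIGITS c = false := by
        simpa using hfc
      have := contains_iff_get?_isSome c
      rw [hcf] at this
      exact Option.not_isSome_iff_eq_none.mp (by simp [← this])
    rw [pvRotLoop_invalid _ _ this]
    simp [hall]

-- ===== VERDICT (by name: the statement is the Claim_ definition above) =====
theorem rotate_number_spec : Claim_equal_rotate_number := by
  intro number _
  unfold Spec_rotate_number rotate_number rotate_number_alt
  exact core (PySem.Int.toChars number)
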